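-- pv_equiv track=rewrite | github.com/thaliaelie/skill-share-thalia-spend-trend-analysis | spend_trend_runner.py | identify_provider
-- ===== SOURCE A (Python) =====
-- def identify_provider(rt: str) -> str:
--     """Identify cloud provider from resource type name."""
--     rt_lower = rt.lower()
--     if any(x in rt_lower for x in ["microsoft.", "azure."]):
--         return "Azure"
--     if any(x in rt_lower for x in [
--         "app engine", "artifact registry", "bigquery", "cloud armor", "cloud build",
--         "cloud cdn", "cloud dataflow", "cloud dns", "cloud filestore", "cloud functions",
--         "cloud interconnect", "cloud load balancing", "cloud logging", "cloud memorystore",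
--         "cloud monitoring", "cloud nat", "cloud pub/sub", "cloud router", "cloud run",
--         "cloud scheduler", "cloud spanner", "cloud sql", "cloud storage", "cloud tasks",
--         "cloud trace", "compute engine", "gke", "kubernetes engine", "vertex", "dataflow",
--         "dataproc", "composer", "looker", "bigtable", "firestore", "alloydb",
--     ]):
--         return "GCP"
--     if "snowflake" in rt_lower:
--         return "Snowflake"
--     if "datadog" in rt_lower:
--         return "Datadog"
--     if "databricks" in rt_lower or "premium_" in rt_lower or "standard_" in rt_lower:
--         return "Databricks"
--     return "AWS"
-- ===== SOURCE B (Python) =====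
-- PROVIDERS = ["Azure", "GCP", "Snowflake", "Datadog", "Databricks"]
--
-- # flattened (keyword, priority) table; priority = index into PROVIDERS
-- KEYWORDS = [("microsoft.", 0), ("azure.", 0)] + [(k, 1) for k in [
--     "app engine", "artifact registry", "bigquery", "cloud armor", "cloud build",
--     "cloud cdn", "cloud dataflow", "cloud dns", "cloud filestore", "cloud functions",
--     "cloud interconnect", "cloud load balancing", "cloud logging", "cloud memorystore",
--     "cloud monitoring", "cloud nat", "cloud pub/sub", "cloud router", "cloud run",
--     "cloud scheduler", "cloud spanner", "cloud sql", "cloud storage", "cloud tasks",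
--     "cloud trace", "compute engine", "gke", "kubernetes engine", "vertex", "dataflow",
--     "dataproc", "composer", "looker", "bigtable", "firestore", "alloydb",
-- ]] + [("snowflake", 2), ("datadog", 3),
--       ("databricks", 4), ("premium_", 4), ("standard_", 4)]
--
-- # index the table by the keyword's first character
-- BUCKETS = {}
-- for kw, pri in KEYWORDS:
--     BUCKETS.setdefault(kw[0], []).append((kw, pri))
--
--
-- def identify_provider(rt: str) -> str:
--     """Identify cloud provider from resource type name.
--
--     One pass over the positions of the lowercased name; at each position only
--     the keywords indexed under that character are tried, and the minimum
--     matching provider priority is kept.  Default is AWS.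
--     """
--     s = rt.lower()
--     best = len(PROVIDERS)
--     for i in range(len(s)):
--         for kw, pri in BUCKETS.get(s[i], []):
--             if pri < best and s.startswith(kw, i):
--                 best = pri
--     return PROVIDERS[best] if best < len(PROVIDERS) else "AWS"
-- ===== Notes on version B (the rewrite author's own statement) =====
-- stated objective: alternative
-- what changed: Instead of five sequential any-substring tests, B makes one pass over the positions of the lowercased name, consulting a dict that indexes the flattened (keyword, priority) table by first character, and keeps the minimum matching priority in an accumulator, indexing the provider list at the end.
import Mathlib
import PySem

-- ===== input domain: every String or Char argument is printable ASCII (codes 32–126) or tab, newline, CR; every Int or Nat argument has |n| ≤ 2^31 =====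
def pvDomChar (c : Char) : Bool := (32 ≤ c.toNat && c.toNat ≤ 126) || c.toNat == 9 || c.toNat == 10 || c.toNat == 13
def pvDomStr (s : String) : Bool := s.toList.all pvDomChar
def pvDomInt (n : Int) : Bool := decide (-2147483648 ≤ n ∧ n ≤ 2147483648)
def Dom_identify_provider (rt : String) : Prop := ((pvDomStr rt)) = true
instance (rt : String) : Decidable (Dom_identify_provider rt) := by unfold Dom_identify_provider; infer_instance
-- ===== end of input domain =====

-- B replaces A's five sequential any-substring tests by one pass over the
-- positions of the lowercased name with a dict indexing a flattened
-- (keyword, priority) table by first character, keeping the minimum matching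
-- priority (alternative decomposition; not claimed faster).

-- ===== PORT A =====
def identify_provider (rt : String) : String :=
  let rt_lower := PySem.Str.lower rt
  if ["microsoft.", "azure."].any (fun x => PySem.Str.isIn x rt_lower) then "Azure"
  else if ["app engine", "artifact registry", "bigquery", "cloud armor", "cloud build",
    "cloud cdn", "cloud dataflow", "cloud dns", "cloud filestore", "cloud functions",
    "cloud interconnect", "cloud load balancing", "cloud logging", "cloud memorystore",
    "cloud monitoring", "cloud nat", "cloud pub/sub", "cloud router", "cloud run",
    "cloud scheduler", "cloud spanner", "cloud sql", "cloud storage", "cloud tasks",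
    "cloud trace", "compute engine", "gke", "kubernetes engine", "vertex", "dataflow",
    "dataproc", "composer", "looker", "bigtable", "firestore", "alloydb"].any
      (fun x => PySem.Str.isIn x rt_lower) then "GCP"
  else if PySem.Str.isIn "snowflake" rt_lower then "Snowflake"
  else if PySem.Str.isIn "datadog" rt_lower then "Datadog"
  else if PySem.Str.isIn "databricks" rt_lower
        || (PySem.Str.isIn "premium_" rt_lower || PySem.Str.isIn "standard_" rt_lower) then "Databricks"
  else "AWS"

-- ===== PORT B =====
def pvProviders : List String := ["Azure", "GCP", "Snowflake", "Datadog", "Databricks"]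

-- flattened (keyword, priority) table of Source B, keywords as code-point lists
def pvKeywords : List (List Char × Nat) :=
  [("microsoft.".toList, 0), ("azure.".toList, 0)] ++
  (["app engine", "artifact registry", "bigquery", "cloud armor", "cloud build",
    "cloud cdn", "cloud dataflow", "cloud dns", "cloud filestore", "cloud functions",
    "cloud interconnect", "cloud load balancing", "cloud logging", "cloud memorystore",
    "cloud monitoring", "cloud nat", "cloud pub/sub", "cloud router", "cloud run",
    "cloud scheduler", "cloud spanner", "cloud sql", "cloud storage", "cloud tasks",
    "cloud trace", "compute engine", "gke", "kubernetes engine", "vertex", "dataflow",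
    "dataproc", "composer", "looker", "bigtable", "firestore", "alloydb"].map
      (fun k => (k.toList, 1))) ++
  [("snowflake".toList, 2), ("datadog".toList, 3),
   ("databricks".toList, 4), ("premium_".toList, 4), ("standard_".toList, 4)]

-- Source B's module-level loop: BUCKETS.setdefault(kw[0], []).append((kw, pri));
-- kw[0] ported with pyGet? (the none branch is unreachable: no keyword is empty)
def pvBuckets : PySem.Dict Char (List (List Char × Nat)) :=
  pvKeywords.foldl
    (fun d p =>
      match PySem.List.pyGet? p.1 (0 : Int) with
      | none => d
      | some ch => d.insert ch (d.getD ch [] ++ [p]))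
    PySem.Dict.empty

-- s.startswith(kw, i) with 0 ≤ i ≤ len(s) is exactly: kw is a prefix of s[i:],
-- i.e. PySem.Chars.startswith (s.drop i) kw; s[i] ported with pyGet?
def identify_provider_alt (rt : String) : String :=
  let s := (PySem.Str.lower rt).toList
  let best := (List.range s.length).foldl
    (fun (b : Nat) (i : Nat) =>
      match PySem.List.pyGet? s (i : Int) with
      | none => b
      | some c =>
          (pvBuckets.getD c []).foldl
            (fun b p => if p.2 < b ∧ PySem.Chars.startswith (s.drop i) p.1 then p.2 else b) b)
    pvProviders.length
  if best < pvProviders.length then pvProviders.getD best "AWS" else "AWS"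

-- ===== PRECONDITION & SPEC =====
def Spec_identify_provider (rt : String) (out : String) : Prop := out = identify_provider_alt rt
instance (rt : String) (out : String) : Decidable (Spec_identify_provider rt out) := by unfold Spec_identify_provider; infer_instance

-- ===== CLAIM (what is proved, stated in full; the proofs are below) =====
def Claim_equal_identify_provider : Prop := ∀ (rt : String), Dom_identify_provider rt → Spec_identify_provider rt (identify_provider rt)

-- ===== LEMMAS AND PROOFS =====

-- proof-side view of B: the same minimum-priority update, but over the FULL
-- keyword table at each suffix
def pvStep (s : List Char) (best : Nat) : Nat :=
  pvKeywords.foldl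
    (fun b p => if p.2 < b ∧ PySem.Chars.startswith s p.1 then p.2 else b) best

def pvScan : List Char → Nat → Nat
  | [], best => best
  | c :: rest, best => pvScan rest (pvStep (c :: rest) best)

-- finite table facts
theorem pvKw_ne_nil : ∀ p ∈ pvKeywords, p.1 ≠ [] := by decide
theorem pvKw_pri_lt : ∀ p ∈ pvKeywords, p.2 < 5 := by decide

-- the bucket dict built by setdefault-append holds exactly the entries whose
-- keyword starts with the key, in table order
theorem pvBuild_getD (L : List (List Char × Nat)) (hL : ∀ p ∈ L, p.1 ≠ [])
    (d : PySem.Dict Char (List (List Char × Nat))) (c : Char) :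
    (L.foldl
      (fun d p =>
        match PySem.List.pyGet? p.1 (0 : Int) with
        | none => d
        | some ch => d.insert ch (d.getD ch [] ++ [p]))
      d).getD c []
    = d.getD c [] ++ L.filter (fun p => p.1.head? == some c) := by
  induction L generalizing d with
  | nil => simp
  | cons p L ih =>
      obtain ⟨ch, t, hp⟩ : ∃ ch t, p.1 = ch :: t := by
        cases hpp : p.1 with
        | nil => exact absurd hpp (hL p (List.mem_cons_self ..))
        | cons ch t => exact ⟨ch, t, rfl⟩
      have hg : PySem.List.pyGet? p.1 (0 : Int) = some ch := by
        rw [hp]; simp [PySem.List.pyGet?, PySem.List.pyIdx?]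
      simp only [List.foldl_cons, hg]
      rw [ih (fun q hq => hL q (List.mem_cons_of_mem _ hq))]
      by_cases hc : ch = c
      · subst hc
        simp [PySem.Dict.getD, PySem.Dict.get?_insert_self, hp]
      · simp [PySem.Dict.getD, PySem.Dict.get?_insert_of_ne d _ (Ne.symm hc), hp, hc]

theorem pvBuckets_getD (c : Char) :
    pvBuckets.getD c [] = pvKeywords.filter (fun p => p.1.head? == some c) := by
  rw [pvBuckets, pvBuild_getD pvKeywords pvKw_ne_nil PySem.Dict.empty c]
  simp [PySem.Dict.getD, PySem.Dict.get?_empty]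

-- entries whose keyword does not start with the suffix's first character are
-- identity steps, so folding over the bucket equals folding over the table
theorem pvFold_filter (L : List (List Char × Nat)) (t : List Char) (b : Nat)
    (q : List Char × Nat → Bool)
    (h : ∀ p ∈ L, q p = false → PySem.Chars.startswith t p.1 = false) :
    (L.filter q).foldl
      (fun b p => if p.2 < b ∧ PySem.Chars.startswith t p.1 then p.2 else b) b
    = L.foldl
      (fun b p => if p.2 < b ∧ PySem.Chars.startswith t p.1 then p.2 else b) b := by
  induction L generalizing b with
  | nil => rfl
  | cons p L ih =>
      rw [List.filter_cons]
      by_cases hq : q p = true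
      · rw [if_pos hq, List.foldl_cons, List.foldl_cons]
        exact ih _ (fun r hr => h r (List.mem_cons_of_mem _ hr))
      · have hf := h p (List.mem_cons_self ..) (by simpa using hq)
        rw [if_neg (by simpa using hq), List.foldl_cons, hf]
        simp only [Bool.false_eq_true, and_false, if_false]
        exact ih _ (fun r hr => h r (List.mem_cons_of_mem _ hr))

-- at a nonempty suffix, the bucket of the first character suffices
theorem pvBucket_step (c : Char) (r : List Char) (b : Nat) :
    (pvBuckets.getD c []).foldl
      (fun b p => if p.2 < b ∧ PySem.Chars.startswith (c :: r) p.1 then p.2 else b) b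
    = pvStep (c :: r) b := by
  rw [pvBuckets_getD, pvStep]
  refine pvFold_filter pvKeywords (c :: r) b _ (fun p hp hq => ?_)
  by_contra hsw
  rcases (PySem.Chars.startswith_iff _ _).mp (Bool.not_eq_false _ |>.mp hsw) with ⟨v, hv⟩
  rcases List.exists_cons_of_ne_nil (pvKw_ne_nil p hp) with ⟨d, u, hpu⟩
  rw [hpu] at hv
  cases hv
  simp [hpu] at hq

-- the position loop over List.range equals the recursion over suffixes
theorem pvRange_scan (s : List Char) (b : Nat) :
    (List.range s.length).foldl (fun b i => pvStep (List.drop i s) b) b = pvScan s b := by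
  induction s generalizing b with
  | nil => rfl
  | cons c r ih =>
      rw [List.length_cons, List.range_succ_eq_map, List.foldl_cons, List.foldl_map]
      exact ih (pvStep (c :: r) b)

-- the alt port computes pvScan of the lowered string
set_option maxHeartbeats 1000000 in
theorem pvAlt_eq (rt : String) :
    identify_provider_alt rt =
      pvProviders.getD (pvScan (PySem.Str.lower rt).toList 5) "AWS" := by
  unfold identify_provider_alt
  dsimp only
  rw [PySem.List.foldl_congr_mem _ _
    (fun (b : Nat) (i : Nat) => pvStep (List.drop i (PySem.Str.lower rt).toList) b) _
    (fun b i hi => ?_), pvRange_scan]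
  · split
    · rfl
    · next h => exact (List.getD_eq_default _ _ (Nat.not_lt.mp h)).symm
  · have hlt : i < (PySem.Str.lower rt).toList.length := List.mem_range.mp hi
    have hne : (List.drop i (PySem.Str.lower rt).toList) ≠ [] := by
      intro hnil
      have hlen := congrArg List.length hnil
      simp only [List.length_drop, List.length_nil] at hlen
      omega
    rcases List.exists_cons_of_ne_nil hne with ⟨c, r, hdrop⟩
    have hd : PySem.List.pyGet? (PySem.Str.lower rt).toList (i : Int) = some c := by
      rw [PySem.List.pyGet?_natCast, ← List.head?_drop, hdrop]; rfl
    simp only [hd, hdrop]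
    exact pvBucket_step c r b

-- the fold only decreases the accumulator
theorem pvFold_le (L : List (List Char × Nat)) (s : List Char) (b : Nat) :
    L.foldl (fun b p => if p.2 < b ∧ PySem.Chars.startswith s p.1 then p.2 else b) b ≤ b := by
  induction L generalizing b with
  | nil => simp
  | cons p L ih =>
      simp only [List.foldl_cons]
      refine le_trans (ih _) ?_
      split
      · next h => exact Nat.le_of_lt h.1
      · exact le_rfl

-- any matching table entry bounds the fold's result
theorem pvFold_ub (L : List (List Char × Nat)) (s : List Char) (b : Nat)
    (p : List Char × Nat) (hp : p ∈ L) (hc : PySem.Chars.startswith s p.1 = true) :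
    L.foldl (fun b q => if q.2 < b ∧ PySem.Chars.startswith s q.1 then q.2 else b) b ≤ p.2 := by
  induction L generalizing b with
  | nil => cases hp
  | cons q L ih =>
      simp only [List.foldl_cons]
      rcases List.mem_cons.mp hp with rfl | hp
      · refine le_trans (pvFold_le _ _ _) ?_
        by_cases hb : p.2 < b
        · rw [if_pos ⟨hb, hc⟩]
        · rw [if_neg (fun h => hb h.1)]; omega
      · exact ih _ hp

-- the fold's result is the initial value or the priority of a matching entry
theorem pvFold_att (L : List (List Char × Nat)) (s : List Char) (b : Nat) :
    (L.foldl (fun b q => if q.2 < b ∧ PySem.Chars.startswith s q.1 then q.2 else b) b = b) ∨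
    ∃ p ∈ L, PySem.Chars.startswith s p.1 = true ∧
      L.foldl (fun b q => if q.2 < b ∧ PySem.Chars.startswith s q.1 then q.2 else b) b = p.2 := by
  induction L generalizing b with
  | nil => exact Or.inl rfl
  | cons q L ih =>
      simp only [List.foldl_cons]
      rcases ih (if q.2 < b ∧ PySem.Chars.startswith s q.1 then q.2 else b) with h | ⟨p, hp, hc, h⟩
      · rw [h]
        split
        · next hq => exact Or.inr ⟨q, List.mem_cons_self .., hq.2, rfl⟩
        · exact Or.inl rfl
      · exact Or.inr ⟨p, List.mem_cons_of_mem _ hp, hc, h⟩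

theorem pvStep_le (s : List Char) (b : Nat) : pvStep s b ≤ b := pvFold_le _ _ _

theorem pvStep_ub (s : List Char) (b : Nat) (p : List Char × Nat) (hp : p ∈ pvKeywords)
    (hc : PySem.Chars.startswith s p.1 = true) : pvStep s b ≤ p.2 :=
  pvFold_ub _ _ _ p hp hc

theorem pvStep_att (s : List Char) (b : Nat) :
    pvStep s b = b ∨ ∃ p ∈ pvKeywords, PySem.Chars.startswith s p.1 = true ∧ pvStep s b = p.2 :=
  pvFold_att _ _ _

theorem pvScan_le (s : List Char) (b : Nat) : pvScan s b ≤ b := by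
  induction s generalizing b with
  | nil => exact le_rfl
  | cons c r ih => exact le_trans (ih _) (pvStep_le _ _)

-- upper bound: a keyword matching at some nonempty suffix bounds the scan result
theorem pvScan_ub (s : List Char) (b : Nat) (p : List Char × Nat) (hp : p ∈ pvKeywords)
    (t : List Char) (ht : t <:+ s) (hne : t ≠ [])
    (hc : PySem.Chars.startswith t p.1 = true) : pvScan s b ≤ p.2 := by
  induction s generalizing b with
  | nil => exact absurd (List.suffix_nil.mp ht) hne
  | cons c r ih =>
      rcases List.suffix_cons_iff.mp ht with h | h
      · subst h
        rw [pvScan]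
        exact le_trans (pvScan_le _ _) (pvStep_ub _ _ _ hp hc)
      · exact ih _ h

-- attainment: the scan result is the initial value or the priority of a keyword
-- that is a prefix of some suffix of s
theorem pvScan_att (s : List Char) (b : Nat) :
    pvScan s b = b ∨ ∃ p ∈ pvKeywords, (∃ t, t <:+ s ∧ PySem.Chars.startswith t p.1 = true) ∧
      pvScan s b = p.2 := by
  induction s generalizing b with
  | nil => exact Or.inl rfl
  | cons c r ih =>
      rcases ih (pvStep (c :: r) b) with h | ⟨p, hp, ⟨t, ht, hc⟩, h⟩
      · rcases pvStep_att (c :: r) b with h2 | ⟨p, hp, hc, h2⟩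
        · exact Or.inl (by rw [pvScan, h]; exact h2)
        · exact Or.inr ⟨p, hp, ⟨c :: r, List.suffix_rfl, hc⟩, by rw [pvScan, h]; exact h2⟩
      · exact Or.inr ⟨p, hp, ⟨t, ht.trans (List.suffix_cons c r), hc⟩, by rw [pvScan]; exact h⟩

-- substring occurrence ↔ prefix of a nonempty suffix
theorem pvIsIn_iff (kw s : List Char) (hne : kw ≠ []) :
    PySem.Chars.isIn kw s = true ↔
      ∃ t, t <:+ s ∧ t ≠ [] ∧ PySem.Chars.startswith t kw = true := by
  rw [PySem.Chars.isIn_iff_infix]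
  constructor
  · rintro ⟨u, v, rfl⟩
    refine ⟨kw ++ v, ⟨u, by simp⟩, by simp [hne], ?_⟩
    exact (PySem.Chars.startswith_iff _ _).mpr ⟨v, rfl⟩
  · rintro ⟨t, ⟨u, rfl⟩, -, hc⟩
    rcases (PySem.Chars.startswith_iff _ _).mp hc with ⟨v, rfl⟩
    exact ⟨u, v, by simp⟩

-- pvM pr s : some keyword of priority pr occurs in s
def pvM (pr : Nat) (s : List Char) : Prop :=
  ∃ p ∈ pvKeywords, p.2 = pr ∧ PySem.Chars.isIn p.1 s = true

theorem pvM_lt {pr : Nat} {s : List Char} (h : pvM pr s) : pr < 5 := by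
  rcases h with ⟨p, hp, hpr, -⟩
  exact hpr ▸ pvKw_pri_lt p hp

theorem pvScan_ub' (s : List Char) (pr : Nat) (h : pvM pr s) : pvScan s 5 ≤ pr := by
  rcases h with ⟨p, hp, hpr, hin⟩
  rcases (pvIsIn_iff p.1 s (pvKw_ne_nil p hp)).mp hin with ⟨t, ht, hne, hc⟩
  exact hpr ▸ pvScan_ub s 5 p hp t ht hne hc

theorem pvScan_cases (s : List Char) :
    pvScan s 5 = 5 ∨ (pvM (pvScan s 5) s ∧ pvScan s 5 < 5) := by
  rcases pvScan_att s 5 with h | ⟨p, hp, ⟨t, ht, hc⟩, h⟩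
  · exact Or.inl h
  · refine Or.inr ⟨⟨p, hp, h.symm, ?_⟩, h ▸ pvKw_pri_lt p hp⟩
    refine (pvIsIn_iff p.1 s (pvKw_ne_nil p hp)).mpr ⟨t, ht, ?_, hc⟩
    rintro rfl
    rcases (PySem.Chars.startswith_iff _ _).mp hc with ⟨v, hv⟩
    simp only [List.append_eq_nil_iff] at hv
    exact (pvKw_ne_nil p hp) hv.1

theorem pvScan_eq (s : List Char) (pr : Nat) (hm : pvM pr s)
    (hlow : ∀ q, q < pr → ¬ pvM q s) : pvScan s 5 = pr := by
  have hub := pvScan_ub' s pr hm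
  rcases pvScan_cases s with h | ⟨hM, hlt⟩
  · have := pvM_lt hm; omega
  · by_contra hne
    exact hlow _ (by omega) hM

theorem pvScan_none (s : List Char) (hnone : ∀ q, ¬ pvM q s) : pvScan s 5 = 5 := by
  rcases pvScan_cases s with h | ⟨hM, -⟩
  · exact h
  · exact absurd hM (hnone _)

-- bridge between A's per-provider any-tests and pvM
theorem pvClass_iff (A : List String) (pr : Nat) (w : String)
    (h1 : ∀ x ∈ A, (x.toList, pr) ∈ pvKeywords)
    (h2 : ∀ p ∈ pvKeywords, p.2 = pr → ∃ x ∈ A, x.toList = p.1) :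
    (A.any fun x => PySem.Str.isIn x w) = true ↔ pvM pr w.toList := by
  rw [List.any_eq_true]
  constructor
  · rintro ⟨x, hx, hin⟩
    exact ⟨(x.toList, pr), h1 x hx, rfl, by rw [PySem.Str.isIn_eq] at hin; exact hin⟩
  · rintro ⟨p, hp, hpr, hin⟩
    rcases h2 p hp hpr with ⟨x, hx, hxt⟩
    exact ⟨x, hx, by rw [PySem.Str.isIn_eq, hxt]; exact hin⟩

-- ===== VERDICT (by name: the statement is the Claim_ definition above) =====
theorem identify_provider_spec : Claim_equal_identify_provider := by
  intro rt _
  unfold Spec_identify_provider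
  rw [pvAlt_eq]
  have i0 := pvClass_iff ["microsoft.", "azure."] 0 (PySem.Str.lower rt)
    (by decide) (by decide)
  have i1 := pvClass_iff ["app engine", "artifact registry", "bigquery", "cloud armor",
    "cloud build", "cloud cdn", "cloud dataflow", "cloud dns", "cloud filestore",
    "cloud functions", "cloud interconnect", "cloud load balancing", "cloud logging",
    "cloud memorystore", "cloud monitoring", "cloud nat", "cloud pub/sub", "cloud router",
    "cloud run", "cloud scheduler", "cloud spanner", "cloud sql", "cloud storage",
    "cloud tasks", "cloud trace", "compute engine", "gke", "kubernetes engine", "vertex",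
    "dataflow", "dataproc", "composer", "looker", "bigtable", "firestore", "alloydb"]
    1 (PySem.Str.lower rt) (by decide) (by decide)
  have i2 := pvClass_iff ["snowflake"] 2 (PySem.Str.lower rt) (by decide) (by decide)
  have i3 := pvClass_iff ["datadog"] 3 (PySem.Str.lower rt) (by decide) (by decide)
  have i4 := pvClass_iff ["databricks", "premium_", "standard_"] 4 (PySem.Str.lower rt)
    (by decide) (by decide)
  simp only [List.any_cons, List.any_nil, Bool.or_false] at i2 i3 i4
  unfold identify_provider
  dsimp only
  split_ifs with h0 h1 h2 h3 h4
  · rw [pvScan_eq _ 0 (i0.mp h0) (fun q hq => absurd hq (Nat.not_lt_zero q))]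
    rfl
  · rw [pvScan_eq _ 1 (i1.mp h1) ?_]
    · rfl
    · intro q hq hm
      interval_cases q
      · exact h0 (i0.mpr hm)
  · rw [pvScan_eq _ 2 (i2.mp h2) ?_]
    · rfl
    · intro q hq hm
      interval_cases q
      · exact h0 (i0.mpr hm)
      · exact h1 (i1.mpr hm)
  · rw [pvScan_eq _ 3 (i3.mp h3) ?_]
    · rfl
    · intro q hq hm
      interval_cases q
      · exact h0 (i0.mpr hm)
      · exact h1 (i1.mpr hm)
      · exact h2 (i2.mpr hm)
  · rw [pvScan_eq _ 4 (i4.mp h4) ?_]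
    · rfl
    · intro q hq hm
      interval_cases q
      · exact h0 (i0.mpr hm)
      · exact h1 (i1.mpr hm)
      · exact h2 (i2.mpr hm)
      · exact h3 (i3.mpr hm)
  · rw [pvScan_none _ ?_]
    · rfl
    · intro q hm
      have h5 := pvM_lt hm
      interval_cases q
      · exact h0 (i0.mpr hm)
      · exact h1 (i1.mpr hm)
      · exact h2 (i2.mpr hm)
      · exact h3 (i3.mpr hm)
      · exact h4 (i4.mpr hm)
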